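-- pv_equiv track=rewrite | github.com/Htyg24/Python_homework | Homework_2.py | Print_count
-- ===== SOURCE A (Python) =====
-- def Print_count(N):
--     count = '('
--     for i in range(1, N + 1):
--         if i != 1:
--             count += ", "
--         for j in range(1, i + 1):
--             count += str(j)
--             if j != i:
--                 count += '*'
--     count += ")"
--     return count
-- ===== SOURCE B (Python) =====
-- def Print_count(N):
--     cur = ""
--     terms = []
--     for i in range(1, N + 1):
--         if i == 1:
--             cur = str(i)
--         else:
--             cur = cur + "*" + str(i)
--         terms.append(cur)
--     return "(" + ", ".join(terms) + ")"
-- ===== Notes on version B (the rewrite author's own statement) =====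
-- stated objective: faster
-- what changed: B replaces A's nested loop (rebuilding every term 1*2*...*i from scratch) with a single pass that extends the previous term by '*i' and joins the collected terms once at the end.
import Mathlib
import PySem

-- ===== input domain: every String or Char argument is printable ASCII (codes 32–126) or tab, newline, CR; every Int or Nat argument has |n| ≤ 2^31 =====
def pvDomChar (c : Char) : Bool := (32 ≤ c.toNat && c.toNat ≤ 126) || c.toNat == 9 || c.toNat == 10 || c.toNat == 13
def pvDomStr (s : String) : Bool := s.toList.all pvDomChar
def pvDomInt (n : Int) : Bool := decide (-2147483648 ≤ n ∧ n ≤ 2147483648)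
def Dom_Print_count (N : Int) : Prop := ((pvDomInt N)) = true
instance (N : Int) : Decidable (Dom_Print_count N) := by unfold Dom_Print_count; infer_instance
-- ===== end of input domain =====

-- B builds each term by extending the previous one in a single pass and joins the
-- collected terms once, instead of A's nested loop rebuilding every term from 1.

-- ===== PORT A =====
def Print_count (N : Int) : String :=
  let count := (PySem.List.pyRange 1 (N + 1) 1).foldl (fun count i =>
    let count := if i != (1 : Int) then count ++ ", " else count
    (PySem.List.pyRange 1 (i + 1) 1).foldl (fun count j =>
      let count := count ++ PySem.Int.toStr j
      if j != i then count ++ "*" else count) count) "("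
  count ++ ")"

-- ===== PORT B =====
def Print_count_alt (N : Int) : String :=
  let st := (PySem.List.pyRange 1 (N + 1) 1).foldl
    (fun (st : String × List String) i =>
      let cur := if i == (1 : Int) then PySem.Int.toStr i
                 else st.1 ++ "*" ++ PySem.Int.toStr i
      (cur, st.2 ++ [cur])) ("", [])
  "(" ++ PySem.Str.join ", " st.2 ++ ")"

-- ===== PRECONDITION & SPEC =====
def Spec_Print_count (N : Int) (out : String) : Prop := out = Print_count_alt N
instance (N : Int) (out : String) : Decidable (Spec_Print_count N out) := by unfold Spec_Print_count; infer_instance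

-- ===== CLAIM (what is proved, stated in full; the proofs are below) =====
def Claim_equal_Print_count : Prop := ∀ (N : Int), Dom_Print_count N → Spec_Print_count N (Print_count N)

-- ===== LEMMAS AND PROOFS =====

-- named versions (definitionally equal) of the two loop bodies, for the invariant
def pvInnerStep (i : Int) (count : String) (j : Int) : String :=
  let count := count ++ PySem.Int.toStr j
  if j != i then count ++ "*" else count

def pvStepA (count : String) (i : Int) : String :=
  let count := if i != (1 : Int) then count ++ ", " else count
  (PySem.List.pyRange 1 (i + 1) 1).foldl (pvInnerStep i) count

def pvStepB (st : String × List String) (i : Int) : String × List String :=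
  let cur := if i == (1 : Int) then PySem.Int.toStr i
             else st.1 ++ "*" ++ PySem.Int.toStr i
  (cur, st.2 ++ [cur])

-- A's i-th term: the value of the inner loop started from ""
def pvInnerVal (i : Int) : String :=
  (PySem.List.pyRange 1 (i + 1) 1).foldl (pvInnerStep i) ""

-- the inner loop only appends, so the start can be factored out
theorem pvInner_factor (l : List Int) (i : Int) : ∀ (c : String),
    l.foldl (pvInnerStep i) c = c ++ l.foldl (pvInnerStep i) "" := by
  induction l with
  | nil => intro c; simp
  | cons x xs ih =>
    intro c
    simp only [List.foldl_cons]
    rw [ih (pvInnerStep i c x), ih (pvInnerStep i "" x)]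
    have h : pvInnerStep i c x = c ++ pvInnerStep i "" x := by
      simp only [pvInnerStep]
      split <;> simp [String.append_assoc]
    rw [h, String.append_assoc]

def pvStarVal (i : Int) : String :=
  (PySem.List.pyRange 1 i 1).foldl (fun c j => c ++ PySem.Int.toStr j ++ "*") ""

theorem pvInnerVal_eq (i : Int) (hi : 1 ≤ i) :
    pvInnerVal i = pvStarVal i ++ PySem.Int.toStr i := by
  unfold pvInnerVal pvStarVal
  rw [PySem.List.pyRange_one_succ_right hi, List.foldl_append]
  have hcong : (PySem.List.pyRange 1 i 1).foldl (pvInnerStep i) "" =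
      (PySem.List.pyRange 1 i 1).foldl (fun c j => c ++ PySem.Int.toStr j ++ "*") "" := by
    apply PySem.List.foldl_congr_mem
    intro c j hj
    have hjlt := (PySem.List.mem_pyRange_one.mp hj).2
    simp only [pvInnerStep, String.append_assoc]
    have : (j != i) = true := by simp; omega
    rw [this]
    simp
  rw [hcong]
  simp [pvInnerStep]

theorem pvInnerVal_succ (i : Int) (hi : 1 ≤ i) :
    pvInnerVal (i + 1) = pvInnerVal i ++ "*" ++ PySem.Int.toStr (i + 1) := by
  rw [pvInnerVal_eq i hi, pvInnerVal_eq (i + 1) (by omega)]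
  have h : pvStarVal (i + 1) = pvStarVal i ++ PySem.Int.toStr i ++ "*" := by
    unfold pvStarVal
    rw [PySem.List.pyRange_one_succ_right hi, List.foldl_append]
    simp
  rw [h]

theorem pvCharsJoin_snoc (sep : List Char) (ts : List (List Char)) (x : List Char)
    (h : ts ≠ []) :
    PySem.Chars.join sep (ts ++ [x]) = PySem.Chars.join sep ts ++ sep ++ x := by
  induction ts with
  | nil => exact absurd rfl h
  | cons a l ih =>
    cases l with
    | nil => simp [PySem.Chars.join_cons_cons, PySem.Chars.join_singleton]
    | cons b m =>
      have h1 : (a :: b :: m) ++ [x] = a :: b :: (m ++ [x]) := rfl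
      have h2 : b :: (m ++ [x]) = (b :: m) ++ [x] := rfl
      rw [h1, PySem.Chars.join_cons_cons, h2, ih (by simp),
        PySem.Chars.join_cons_cons]
      simp

theorem pvJoin_snoc (terms : List String) (x : String) (h : terms ≠ []) :
    PySem.Str.join ", " (terms ++ [x]) = PySem.Str.join ", " terms ++ ", " ++ x := by
  have hne : terms.map String.toList ≠ [] := by simpa using h
  have hc := pvCharsJoin_snoc ((", " : String).toList) (terms.map String.toList)
    x.toList hne
  refine String.toList_inj.mp ?_
  simp [PySem.Str.join]
  simpa using hc

-- the loop invariant: after n iterations A's string is "(" ++ the join of B's terms,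
-- B's cur is A's n-th term, and B's terms are empty iff n = 0
theorem pvMain (n : Nat) :
    (PySem.List.pyRange 1 ((n : Int) + 1) 1).foldl pvStepA "(" =
      "(" ++ PySem.Str.join ", "
        ((PySem.List.pyRange 1 ((n : Int) + 1) 1).foldl pvStepB ("", [])).2
    ∧ ((PySem.List.pyRange 1 ((n : Int) + 1) 1).foldl pvStepB ("", [])).1
        = pvInnerVal ((n : Int))
    ∧ (((PySem.List.pyRange 1 ((n : Int) + 1) 1).foldl pvStepB ("", [])).2 = []
        ↔ n = 0) := by
  induction n with
  | zero =>
    rw [PySem.List.pyRange_one_eq_nil (by norm_num)]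
    exact ⟨by decide, by decide, by simp⟩
  | succ n ih =>
    obtain ⟨ihA, ihCur, ihNil⟩ := ih
    have hc2 : (((n + 1 : Nat)) : Int) = (n : Int) + 1 := by push_cast; ring
    rw [hc2, PySem.List.pyRange_one_succ_right (by omega : (1 : Int) ≤ (n : Int) + 1),
      List.foldl_append, List.foldl_append, List.foldl_cons, List.foldl_cons,
      List.foldl_nil, List.foldl_nil]
    by_cases hn : n = 0
    · subst hn
      refine ⟨?_, ?_, by simp [pvStepB]⟩ <;> decide
    · have hn1 : (1 : Int) ≤ (n : Int) := by omega
      have hA : pvStepA ((PySem.List.pyRange 1 ((n : Int) + 1) 1).foldl pvStepA "(")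
          ((n : Int) + 1)
          = (PySem.List.pyRange 1 ((n : Int) + 1) 1).foldl pvStepA "("
            ++ ", " ++ pvInnerVal ((n : Int) + 1) := by
        simp only [pvStepA]
        have hne : ((n : Int) + 1 != (1 : Int)) = true := by simp; omega
        rw [hne]
        simp only [if_true]
        rw [pvInner_factor]
        rfl
      have hB : pvStepB ((PySem.List.pyRange 1 ((n : Int) + 1) 1).foldl pvStepB ("", []))
          ((n : Int) + 1)
          = (pvInnerVal ((n : Int) + 1),
             ((PySem.List.pyRange 1 ((n : Int) + 1) 1).foldl pvStepB ("", [])).2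
               ++ [pvInnerVal ((n : Int) + 1)]) := by
        simp only [pvStepB]
        have heq : ((n : Int) + 1 == (1 : Int)) = false := by simp; omega
        rw [heq]
        simp only [Bool.false_eq_true, if_false]
        rw [ihCur, ← pvInnerVal_succ ((n : Int)) hn1]
      have hterms : ((PySem.List.pyRange 1 ((n : Int) + 1) 1).foldl pvStepB ("", [])).2
          ≠ [] := fun he => hn (ihNil.mp he)
      refine ⟨?_, by rw [hB], by simp [hB]⟩
      rw [hA, hB, pvJoin_snoc _ _ hterms, ihA]
      simp [String.append_assoc]

-- ===== VERDICT (by name: the statement is the Claim_ definition above) =====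
theorem Print_count_spec : Claim_equal_Print_count := by
  intro N _
  show Print_count N = Print_count_alt N
  by_cases hN : N ≤ 0
  · show ((PySem.List.pyRange 1 (N + 1) 1).foldl pvStepA "(") ++ ")" =
      "(" ++ PySem.Str.join ", "
        ((PySem.List.pyRange 1 (N + 1) 1).foldl pvStepB ("", [])).2 ++ ")"
    rw [PySem.List.pyRange_one_eq_nil (by omega : N + 1 ≤ 1)]
    rfl
  · obtain ⟨n, rfl⟩ := Int.eq_ofNat_of_zero_le (by omega : (0 : Int) ≤ N)
    have h := pvMain n
    show ((PySem.List.pyRange 1 ((n : Int) + 1) 1).foldl pvStepA "(") ++ ")" =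
      "(" ++ PySem.Str.join ", "
        ((PySem.List.pyRange 1 ((n : Int) + 1) 1).foldl pvStepB ("", [])).2 ++ ")"
    rw [h.1, String.append_assoc]
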